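-- pv_equiv track=rewrite | github.com/lvy010/AI-exploration | AI_image/1Prompt1Story/story_generator.py | get_max_window_length
-- ===== SOURCE A (Python) =====
-- from typing import List, Tuple, Optional
--
-- def get_max_window_length(id_prompt: str, frame_prompt_list: List[str]) -> int:
--     """
--     计算最大窗口长度（防止提示词过长）
--
--     Args:
--         id_prompt: 身份提示词
--         frame_prompt_list: 帧提示词列表
--
--     Returns:
--         最大可用窗口长度
--     """
--     combined_prompt = id_prompt
--     max_len = 0
--
--     for prompt in frame_prompt_list:
--         combined_prompt += ' ' + prompt
--         if len(combined_prompt.split()) >= 77:  # 标准token限制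
--             break
--         max_len += 1
--
--     return max_len
-- ===== SOURCE B (Python) =====
-- from typing import List
--
-- def get_max_window_length(id_prompt: str, frame_prompt_list: List[str]) -> int:
--     # word counts computed once, cumulative prefix sums, binary search for
--     # the first prefix that reaches 77
--     counts = [len(p.split()) for p in frame_prompt_list]
--     prefix = []
--     total = len(id_prompt.split())
--     for c in counts:
--         total += c
--         prefix.append(total)
--     lo, hi = 0, len(prefix)
--     while lo < hi:
--         mid = (lo + hi) // 2
--         if prefix[mid] < 77:
--             lo = mid + 1
--         else:
--             hi = mid
--     return lo
-- ===== Notes on version B (the rewrite author's own statement) =====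
-- stated objective: alternative
-- what changed: Replaces the loop that rebuilds and re-splits the growing combined string each iteration with per-frame word counts computed once, a prefix-sum table, and a binary search for the first cumulative count reaching 77.
import Mathlib
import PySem

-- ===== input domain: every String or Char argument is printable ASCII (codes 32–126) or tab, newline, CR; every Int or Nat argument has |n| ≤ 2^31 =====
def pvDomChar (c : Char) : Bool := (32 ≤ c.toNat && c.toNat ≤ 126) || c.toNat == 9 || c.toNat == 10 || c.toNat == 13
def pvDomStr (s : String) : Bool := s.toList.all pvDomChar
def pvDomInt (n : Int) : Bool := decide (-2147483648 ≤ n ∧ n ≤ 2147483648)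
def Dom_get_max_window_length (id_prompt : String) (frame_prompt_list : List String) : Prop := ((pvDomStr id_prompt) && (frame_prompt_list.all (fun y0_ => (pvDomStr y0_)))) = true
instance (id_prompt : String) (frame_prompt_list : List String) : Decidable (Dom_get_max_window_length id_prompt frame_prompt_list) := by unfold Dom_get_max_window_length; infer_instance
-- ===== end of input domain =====

-- B replaces A's rebuild-and-resplit loop with per-frame word counts, prefix sums and a binary search (alternative decomposition).

-- ===== PORT A =====
-- A's loop: append ' '+prompt to the combined string, break when its word count reaches 77, else count.
def pvGoA (combined : String) (rest : List String) (max_len : Int) : Int :=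
  match rest with
  | [] => max_len
  | p :: rest' =>
    let combined' := combined ++ " " ++ p
    if 77 ≤ (PySem.Str.split₀ combined').length then max_len
    else pvGoA combined' rest' (max_len + 1)

def get_max_window_length (id_prompt : String) (frame_prompt_list : List String) : Int :=
  pvGoA id_prompt frame_prompt_list 0

-- ===== PORT B =====
-- prefix.append(total) loop of Source B
def pvPrefix (total : Nat) (counts : List Nat) : List Nat :=
  match counts with
  | [] => []
  | c :: cs => (total + c) :: pvPrefix (total + c) cs

-- the `while lo < hi` binary-search loop of Source B
def pvBisect (P : List Nat) (lo hi : Nat) : Nat :=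
  if _h : lo < hi then
    let mid := (lo + hi) / 2  -- (lo+hi)//2 on Nat: Lean's Nat division equals Python's floor division here
    if P.getD mid 0 < 77 then pvBisect P (mid + 1) hi
    else pvBisect P lo mid
  else lo
termination_by hi - lo
decreasing_by all_goals omega

def get_max_window_length_alt (id_prompt : String) (frame_prompt_list : List String) : Int :=
  let counts := frame_prompt_list.map (fun p => (PySem.Str.split₀ p).length)
  let P := pvPrefix (PySem.Str.split₀ id_prompt).length counts
  (pvBisect P 0 P.length : Int)

-- ===== PRECONDITION & SPEC =====
def Spec_get_max_window_length (id_prompt : String) (frame_prompt_list : List String) (out : Int) : Prop := out = get_max_window_length_alt id_prompt frame_prompt_list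
instance (id_prompt : String) (frame_prompt_list : List String) (out : Int) : Decidable (Spec_get_max_window_length id_prompt frame_prompt_list out) := by unfold Spec_get_max_window_length; infer_instance

-- ===== CLAIM (what is proved, stated in full; the proofs are below) =====
def Claim_equal_get_max_window_length : Prop := ∀ (id_prompt : String) (frame_prompt_list : List String), Dom_get_max_window_length id_prompt frame_prompt_list → Spec_get_max_window_length id_prompt frame_prompt_list (get_max_window_length id_prompt frame_prompt_list)

-- ===== LEMMAS AND PROOFS =====

-- word count of a list of chars
def pvWC (s : List Char) : Nat := (PySem.Chars.split₀ s).length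

-- the accumulator only adds its length to the result of split₀.go
theorem pvGo_acc (ys : List Char) : ∀ (cur : List Char) (acc : List (List Char)),
    (PySem.Chars.split₀.go ys cur acc).length = acc.length + (PySem.Chars.split₀.go ys cur []).length := by
  induction ys with
  | nil =>
    intro cur acc
    simp only [PySem.Chars.split₀.go]
    by_cases h : cur.isEmpty <;> simp [h]
  | cons c ys ih =>
    intro cur acc
    simp only [PySem.Chars.split₀.go]
    by_cases hs : PySem.Chars.isspace c
    · by_cases hc : cur.isEmpty
      · simp only [hs, hc, if_true]
        exact ih [] acc
      · simp only [hs, hc, if_true, Bool.false_eq_true, if_false]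
        rw [ih [] (cur.reverse :: acc), ih [] [cur.reverse]]
        simp only [List.length_cons, List.length_nil]
        omega
    · simp only [hs, Bool.false_eq_true, if_false]
      exact ih _ _

-- splitting around an inserted space: word counts add
theorem pvGo_split (ys : List Char) : ∀ (xs cur : List Char) (acc : List (List Char)),
    (PySem.Chars.split₀.go (xs ++ ' ' :: ys) cur acc).length
      = (PySem.Chars.split₀.go xs cur acc).length + (PySem.Chars.split₀.go ys [] []).length := by
  intro xs
  induction xs with
  | nil =>
    intro cur acc
    simp only [List.nil_append, PySem.Chars.split₀.go]
    have hsp : PySem.Chars.isspace ' ' = true := by decide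
    by_cases hc : cur.isEmpty
    · simp only [hsp, hc, if_true]
      rw [pvGo_acc ys [] acc]
      simp
    · simp only [hsp, hc, if_true, Bool.false_eq_true, if_false]
      rw [pvGo_acc ys [] (cur.reverse :: acc)]
      simp only [List.length_cons, List.length_reverse]
  | cons c xs ih =>
    intro cur acc
    simp only [List.cons_append, PySem.Chars.split₀.go]
    by_cases hs : PySem.Chars.isspace c
    · by_cases hc : cur.isEmpty
      · simp [hs, hc, ih]
      · simp [hs, hc, ih]
    · simp [hs, ih]

theorem pvWC_concat (a b : List Char) : pvWC (a ++ ' ' :: b) = pvWC a + pvWC b := by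
  unfold pvWC PySem.Chars.split₀
  exact pvGo_split b a [] []

-- string-level word count
theorem pvWCS (s : String) : (PySem.Str.split₀ s).length = pvWC s.toList := by
  simp [PySem.Str.split₀, pvWC]

theorem pvWCS_concat (a p : String) :
    (PySem.Str.split₀ (a ++ " " ++ p)).length
      = (PySem.Str.split₀ a).length + (PySem.Str.split₀ p).length := by
  rw [pvWCS, pvWCS, pvWCS]
  have : (a ++ " " ++ p).toList = a.toList ++ ' ' :: p.toList := by
    simp [String.toList_append]
  rw [this, pvWC_concat]

-- abstract form of A's loop over word counts
def pvAux (t : Nat) (cs : List Nat) : Nat :=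
  match cs with
  | [] => 0
  | c :: cs' => if 77 ≤ t + c then 0 else pvAux (t + c) cs' + 1

theorem pvGoA_eq (rest : List String) : ∀ (combined : String) (ml : Int),
    pvGoA combined rest ml
      = ml + (pvAux (PySem.Str.split₀ combined).length (rest.map (fun p => (PySem.Str.split₀ p).length)) : Nat) := by
  induction rest with
  | nil => intro combined ml; simp [pvGoA, pvAux]
  | cons p rest ih =>
    intro combined ml
    simp only [pvGoA, List.map_cons, pvAux, pvWCS_concat]
    by_cases h : 77 ≤ (PySem.Str.split₀ combined).length + (PySem.Str.split₀ p).length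
    · simp [h]
    · simp only [h, if_false]
      rw [ih]
      rw [pvWCS_concat]
      push_cast
      ring

-- pvAux counts the prefix sums below 77
theorem pvAux_eq_takeWhile (cs : List Nat) : ∀ (t : Nat),
    pvAux t cs = ((pvPrefix t cs).takeWhile (fun v => v < 77)).length := by
  induction cs with
  | nil => intro t; simp [pvAux, pvPrefix]
  | cons c cs ih =>
    intro t
    simp only [pvAux, pvPrefix, List.takeWhile]
    by_cases h : 77 ≤ t + c
    · have : ¬ (t + c < 77) := by omega
      simp [this]
    · have : t + c < 77 := by omega
      simp [this, ih]

theorem pvPrefix_le (cs : List Nat) : ∀ t v, v ∈ pvPrefix t cs → t ≤ v := by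
  induction cs with
  | nil => intro t v h; simp [pvPrefix] at h
  | cons c cs ih =>
    intro t v h
    simp only [pvPrefix, List.mem_cons] at h
    rcases h with h | h
    · omega
    · have := ih (t + c) v h; omega

theorem pvPrefix_pairwise (cs : List Nat) : ∀ t, (pvPrefix t cs).Pairwise (· ≤ ·) := by
  induction cs with
  | nil => intro t; simp [pvPrefix]
  | cons c cs ih =>
    intro t
    simp only [pvPrefix]
    exact List.Pairwise.cons (fun v hv => pvPrefix_le cs (t + c) v hv) (ih (t + c))

theorem pvMonoGetD {P : List Nat} (hp : P.Pairwise (· ≤ ·)) {i j : Nat}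
    (hij : i ≤ j) (hj : j < P.length) : P.getD i 0 ≤ P.getD j 0 := by
  rcases Nat.eq_or_lt_of_le hij with rfl | hlt
  · exact le_refl _
  · have hi : i < P.length := lt_trans hlt hj
    rw [List.getD_eq_getElem P 0 hi, List.getD_eq_getElem P 0 hj]
    exact (List.pairwise_iff_getElem.mp hp) i j hi hj hlt

-- a takeWhile-length characterisation
theorem pvTW_char (p : Nat → Bool) : ∀ (P : List Nat) (r : Nat), r ≤ P.length →
    (∀ i, i < r → p (P.getD i 0)) → (r < P.length → ¬ p (P.getD r 0)) →
    (P.takeWhile p).length = r := by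
  intro P
  induction P with
  | nil => intro r hr _ _; simp at hr; simp [hr]
  | cons a P ih =>
    intro r hr h1 h2
    match r with
    | 0 =>
      have : ¬ p a := by simpa using h2 (by simp)
      simp [List.takeWhile, this]
    | Nat.succ r' =>
      have ha : p a = true := by simpa using h1 0 (Nat.succ_pos r')
      simp only [List.takeWhile, ha]
      have := ih r' (by simpa using hr)
        (fun i hi => by simpa using h1 (i + 1) (by omega))
        (fun hlt => by simpa using h2 (by simpa using hlt))
      simp [this]

-- binary-search correctness on a nondecreasing list
theorem pvBisect_spec (P : List Nat) (hp : P.Pairwise (· ≤ ·)) :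
    ∀ (n lo hi : Nat), hi - lo = n → lo ≤ hi → hi ≤ P.length →
      (∀ i, i < lo → P.getD i 0 < 77) → (∀ i, hi ≤ i → i < P.length → 77 ≤ P.getD i 0) →
      pvBisect P lo hi = (P.takeWhile (fun v => v < 77)).length := by
  intro n
  induction n using Nat.strong_induction_on with
  | _ n ihn =>
    intro lo hi hn hlohi hhi hlo hge
    rw [pvBisect]
    by_cases h : lo < hi
    · simp only [h, dif_pos]
      set mid := (lo + hi) / 2 with hmid
      have hm1 : lo ≤ mid := by omega
      have hm2 : mid < hi := by omega
      by_cases hc : P.getD mid 0 < 77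
      · simp only [hc, if_pos]
        refine ihn (hi - (mid + 1)) (by omega) (mid + 1) hi rfl (by omega) hhi ?_ hge
        intro i hi'
        have : P.getD i 0 ≤ P.getD mid 0 := pvMonoGetD hp (by omega) (by omega)
        omega
      · simp only [hc]
        refine ihn (mid - lo) (by omega) lo mid rfl (by omega) (by omega) hlo ?_
        intro i hle hilen
        have : P.getD mid 0 ≤ P.getD i 0 := pvMonoGetD hp hle hilen
        omega
    · simp only [h]
      have hlohieq : lo = hi := by omega
      subst hlohieq
      refine (pvTW_char (fun v => decide (v < 77)) P lo (by omega)
        (fun i hi' => by simpa using hlo i hi') ?_).symm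
      intro hlt
      have := hge lo (le_refl _) hlt
      simp only [decide_eq_true_eq, not_lt]
      omega

-- ===== VERDICT (by name: the statement is the Claim_ definition above) =====
theorem get_max_window_length_spec : Claim_equal_get_max_window_length := by
  unfold Claim_equal_get_max_window_length
  intro id_prompt fpl _
  unfold Spec_get_max_window_length get_max_window_length
  simp only [get_max_window_length_alt]
  rw [pvGoA_eq, pvAux_eq_takeWhile]
  rw [pvBisect_spec (pvPrefix (PySem.Str.split₀ id_prompt).length
      (fpl.map (fun p => (PySem.Str.split₀ p).length)))
    (pvPrefix_pairwise _ _) _ 0 _ rfl (by omega) (le_refl _)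
    (by intro i hi'; omega) (by intro i h1 h2; omega)]
  simp
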